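-- pv_equiv track=rewrite | github.com/AxelRadin/LudoKan | backend/apps/games/views_igdb_helpers.py | remove_q_equals_artifact
-- ===== SOURCE A (Python) =====
-- def remove_q_equals_artifact(s: str) -> str:
--     parts: list[str] = []
--     i = 0
--     n = len(s)
--     while i < n:
--         if i + 1 < n and s[i] == "q" and s[i + 1] == "=" and (i == 0 or s[i - 1].isspace()) and i + 2 < n and not s[i + 2].isspace():
--             i += 2
--             continue
--         parts.append(s[i])
--         i += 1
--     return "".join(parts)
-- ===== SOURCE B (Python) =====
-- def remove_q_equals_artifact(s: str) -> str:
--     n = len(s)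
--
--     def is_match(i: int) -> bool:
--         return (s[i] == "q" and s[i + 1] == "="
--                 and not s[i + 2].isspace()
--                 and (i == 0 or s[i - 1].isspace()))
--
--     drop = {j for i in range(n - 2) if is_match(i) for j in (i, i + 1)}
--     return "".join(c for i, c in enumerate(s) if i not in drop)
-- ===== Notes on version B (the rewrite author's own statement) =====
-- stated objective: alternative
-- what changed: Replaces A's sequential index loop with skip-ahead by a two-phase approach: first compute the set of character positions belonging to an artifact match (a purely positional condition, since matches cannot overlap), then filter the string by position membership in one comprehension.
import Mathlib
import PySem

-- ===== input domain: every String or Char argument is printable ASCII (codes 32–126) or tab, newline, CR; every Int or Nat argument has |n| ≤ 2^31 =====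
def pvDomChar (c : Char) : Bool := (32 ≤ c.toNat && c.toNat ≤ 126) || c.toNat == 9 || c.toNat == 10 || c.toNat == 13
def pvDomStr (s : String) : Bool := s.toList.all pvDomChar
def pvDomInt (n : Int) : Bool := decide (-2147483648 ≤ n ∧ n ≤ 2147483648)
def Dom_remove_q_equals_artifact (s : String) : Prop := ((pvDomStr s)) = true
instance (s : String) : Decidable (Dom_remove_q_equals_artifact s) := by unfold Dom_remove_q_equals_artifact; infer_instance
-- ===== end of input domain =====

-- B replaces A's sequential skip-ahead index loop by a two-phase computation (first the set of
-- match positions, then a positional filter); same O(n) cost, different structure ("alternative").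

-- ===== PORT A =====
-- A's while loop over index i; s[i] (every index A evaluates on a taken path is nonnegative and
-- in range thanks to the loop/branch tests) is ported exactly with List.getD.
def pvLoopA (cs : List Char) (n : Nat) (i : Nat) (parts : List Char) : List Char :=
  if _h : i < n then
    if (decide (i + 1 < n) && (cs.getD i ' ' == 'q') && (cs.getD (i+1) ' ' == '=')
        && (decide (i = 0) || PySem.Chars.isspace (cs.getD (i-1) ' '))
        && decide (i + 2 < n) && !PySem.Chars.isspace (cs.getD (i+2) ' ')) = true then
      pvLoopA cs n (i+2) parts
    else
      pvLoopA cs n (i+1) (parts ++ [cs.getD i ' '])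
  else parts
termination_by n - i

def remove_q_equals_artifact (s : String) : String :=
  String.mk (pvLoopA s.toList s.toList.length 0 [])

-- ===== PORT B =====
-- Source B's helper is_match(i); i comes from range(n-2) as a Python int, so indexing is ported with
-- pyGetD (exact: every index evaluated on a taken path is in range — 0 ≤ i < n-2, and s[i-1] is
-- only relevant for i ≥ 1 because of the short-circuit `i == 0 or …`).
def pvIsMatch (cs : List Char) (i : Int) : Bool :=
  (PySem.List.pyGetD cs i ' ' == 'q') && (PySem.List.pyGetD cs (i+1) ' ' == '=')
  && !PySem.Chars.isspace (PySem.List.pyGetD cs (i+2) ' ')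
  && (i == 0 || PySem.Chars.isspace (PySem.List.pyGetD cs (i-1) ' '))

-- the set comprehension {j for i in range(n - 2) if is_match(i) for j in (i, i + 1)}
def pvDropSet (cs : List Char) : PySem.Set Int :=
  (PySem.List.pyRange 0 ((cs.length : Int) - 2) 1).foldl
    (fun acc i => if pvIsMatch cs i then PySem.Set.add (PySem.Set.add acc i) (i+1) else acc)
    PySem.Set.empty

-- "".join(c for i, c in enumerate(s) if i not in drop)
def remove_q_equals_artifact_alt (s : String) : String :=
  String.mk (((PySem.List.enumerate s.toList).filter
    (fun p => !(PySem.Set.contains (pvDropSet s.toList) p.1))).map (·.2))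

-- ===== PRECONDITION & SPEC =====
def Spec_remove_q_equals_artifact (s : String) (out : String) : Prop := out = remove_q_equals_artifact_alt s
instance (s : String) (out : String) : Decidable (Spec_remove_q_equals_artifact s out) := by unfold Spec_remove_q_equals_artifact; infer_instance

-- ===== CLAIM (what is proved, stated in full; the proofs are below) =====
def Claim_equal_remove_q_equals_artifact : Prop := ∀ (s : String), Dom_remove_q_equals_artifact s → Spec_remove_q_equals_artifact s (remove_q_equals_artifact s)

-- ===== LEMMAS AND PROOFS =====

-- the positional match condition, as a Prop (for reasoning) and as a Bool (for filters)
def pvM (cs : List Char) (n i : Nat) : Prop :=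
  i + 2 < n ∧ cs.getD i ' ' = 'q' ∧ cs.getD (i+1) ' ' = '='
    ∧ (i = 0 ∨ PySem.Chars.isspace (cs.getD (i-1) ' ') = true)
    ∧ PySem.Chars.isspace (cs.getD (i+2) ' ') = false

def pvMB (cs : List Char) (n i : Nat) : Bool :=
  decide (i + 2 < n) && (cs.getD i ' ' == 'q') && (cs.getD (i+1) ' ' == '=')
  && (decide (i = 0) || PySem.Chars.isspace (cs.getD (i-1) ' '))
  && !PySem.Chars.isspace (cs.getD (i+2) ' ')

theorem pvMB_iff (cs : List Char) (n i : Nat) : pvMB cs n i = true ↔ pvM cs n i := by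
  unfold pvMB pvM
  simp only [Bool.and_eq_true, decide_eq_true_eq, beq_iff_eq, Bool.or_eq_true,
    Bool.not_eq_true']
  constructor
  · rintro ⟨⟨⟨⟨h1, h2⟩, h3⟩, h4⟩, h5⟩
    exact ⟨h1, h2, h3, h4, h5⟩
  · rintro ⟨h1, h2, h3, h4, h5⟩
    exact ⟨⟨⟨⟨h1, h2⟩, h3⟩, h4⟩, h5⟩

-- index j is removed (second disjunct: j is the '=' of a match starting at j-1)
def pvDropP (cs : List Char) (n j : Nat) : Prop := pvM cs n j ∨ (1 ≤ j ∧ pvM cs n (j-1))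

def pvDropB (cs : List Char) (n j : Nat) : Bool :=
  pvMB cs n j || (decide (1 ≤ j) && pvMB cs n (j-1))

theorem pvDropB_iff (cs : List Char) (n j : Nat) : pvDropB cs n j = true ↔ pvDropP cs n j := by
  unfold pvDropB pvDropP
  simp only [Bool.or_eq_true, Bool.and_eq_true, decide_eq_true_eq, pvMB_iff]

-- A's loop-branch condition is exactly pvM
theorem pvCondA_iff (cs : List Char) (n i : Nat) :
    ((decide (i + 1 < n) && (cs.getD i ' ' == 'q') && (cs.getD (i+1) ' ' == '=')
        && (decide (i = 0) || PySem.Chars.isspace (cs.getD (i-1) ' '))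
        && decide (i + 2 < n) && !PySem.Chars.isspace (cs.getD (i+2) ' ')) = true)
      ↔ pvM cs n i := by
  simp only [Bool.and_eq_true, decide_eq_true_eq, beq_iff_eq, Bool.or_eq_true,
    Bool.not_eq_true', pvM]
  constructor
  · rintro ⟨⟨⟨⟨⟨h1, h2⟩, h3⟩, h4⟩, h5⟩, h6⟩
    exact ⟨h5, h2, h3, h4, h6⟩
  · rintro ⟨h5, h2, h3, h4, h6⟩
    exact ⟨⟨⟨⟨⟨by omega, h2⟩, h3⟩, h4⟩, h5⟩, h6⟩

-- A's loop computes: the still-unvisited positions, with dropped positions filtered out.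
-- Invariant: i is never the second character of a match (i = 0 or ¬ pvM (i-1)).
theorem pvLoopA_eq (cs : List Char) (n : Nat) :
    ∀ (k i : Nat) (parts : List Char), n - i ≤ k → i ≤ n → (i = 0 ∨ ¬ pvM cs n (i-1)) →
    pvLoopA cs n i parts
      = parts ++ (((List.range n).drop i).filter (fun j => !pvDropB cs n j)).map
          (fun j => cs.getD j ' ') := by
  intro k
  induction k with
  | zero =>
    intro i parts hk hi _
    have : i = n := by omega
    subst this
    rw [pvLoopA, dif_neg (lt_irrefl i), List.drop_eq_nil_of_le (by simp)]
    simp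
  | succ k ih =>
    intro i parts hk hi hinv
    by_cases h : i < n
    · rw [pvLoopA, dif_pos h]
      by_cases hM : pvM cs n i
      · rw [if_pos ((pvCondA_iff cs n i).mpr hM)]
        have h2 : i + 2 < n := hM.1
        have heq : cs.getD (i+1) ' ' = '=' := hM.2.2.1
        have hnM1 : ¬ pvM cs n (i+1) := by
          intro hc
          have := hc.2.1
          rw [heq] at this
          exact absurd this (by decide)
        rw [ih (i+2) parts (by omega) (by omega) (Or.inr (by simpa using hnM1))]
        have hd1 : (List.range n).drop i = i :: (List.range n).drop (i+1) := by
          rw [List.drop_eq_getElem_cons (by simpa using h)]; simp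
        have hd2 : (List.range n).drop (i+1) = (i+1) :: (List.range n).drop (i+2) := by
          rw [List.drop_eq_getElem_cons (by simpa using (by omega : i + 1 < n))]; simp
        rw [hd1, hd2]
        have q1 : (!pvDropB cs n i) = false := by
          have hq : pvDropB cs n i = true := (pvDropB_iff cs n i).mpr (Or.inl hM)
          simp [hq]
        have q2 : (!pvDropB cs n (i+1)) = false := by
          have hq : pvDropB cs n (i+1) = true :=
            (pvDropB_iff cs n (i+1)).mpr (Or.inr ⟨by omega, by simpa using hM⟩)
          simp [hq]
        rw [List.filter_cons, q1, List.filter_cons, q2]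
        simp
      · rw [if_neg (fun hc => hM ((pvCondA_iff cs n i).mp hc))]
        rw [ih (i+1) (parts ++ [cs.getD i ' ']) (by omega) (by omega)
              (Or.inr (by simpa using hM))]
        have hd1 : (List.range n).drop i = i :: (List.range n).drop (i+1) := by
          rw [List.drop_eq_getElem_cons (by simpa using h)]; simp
        rw [hd1]
        have q1 : (!pvDropB cs n i) = true := by
          have hq : pvDropB cs n i = false := by
            apply Bool.eq_false_iff.mpr
            intro hc
            rcases (pvDropB_iff cs n i).mp hc with hc | ⟨h1, hc⟩
            · exact hM hc
            · rcases hinv with h0 | hni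
              · omega
              · exact hni hc
          simp [hq]
        rw [List.filter_cons, q1]
        simp
    · have : i = n := by omega
      subst this
      rw [pvLoopA, dif_neg (lt_irrefl i), List.drop_eq_nil_of_le (by simp)]
      simp

-- pvIsMatch at an in-range Nat index agrees with pvM
theorem pvIsMatch_iff (cs : List Char) (k : Nat) (hk : k + 2 < cs.length) :
    pvIsMatch cs (k : Int) = true ↔ pvM cs cs.length k := by
  unfold pvIsMatch pvM
  rw [show ((k : Int) + 1) = ((k + 1 : Nat) : Int) by push_cast; ring,
    show ((k : Int) + 2) = ((k + 2 : Nat) : Int) by push_cast; ring,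
    PySem.List.pyGetD_natCast, PySem.List.pyGetD_natCast, PySem.List.pyGetD_natCast]
  by_cases h0 : k = 0
  · subst h0
    simp [hk]
    tauto
  · rw [show ((k : Int) - 1) = ((k - 1 : Nat) : Int) by omega, PySem.List.pyGetD_natCast]
    simp only [Bool.and_eq_true, beq_iff_eq, Bool.not_eq_true', Bool.or_eq_true,
      Int.natCast_eq_zero]
    constructor
    · rintro ⟨⟨⟨h1, h2⟩, h3⟩, h4⟩
      exact ⟨hk, h1, h2, by tauto, h3⟩
    · rintro ⟨_, h1, h2, h4, h3⟩
      exact ⟨⟨⟨h1, h2⟩, h3⟩, by tauto⟩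

-- membership in the fold that builds the drop set
theorem pvMemFold (cs : List Char) :
    ∀ (l : List Int) (acc : PySem.Set Int) (j : Int),
      (j ∈ l.foldl
        (fun acc i => if pvIsMatch cs i then PySem.Set.add (PySem.Set.add acc i) (i+1) else acc)
        acc)
      ↔ j ∈ acc ∨ ∃ i ∈ l, pvIsMatch cs i = true ∧ (j = i ∨ j = i + 1) := by
  intro l
  induction l with
  | nil => simp
  | cons x xs ih =>
    intro acc j
    rw [List.foldl_cons, ih]
    by_cases hx : pvIsMatch cs x = true
    · rw [if_pos hx]
      rw [PySem.Set.mem_add, PySem.Set.mem_add]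
      constructor
      · rintro (((h | h) | h) | h)
        · exact Or.inl h
        · exact Or.inr ⟨x, by simp, hx, Or.inl h⟩
        · exact Or.inr ⟨x, by simp, hx, Or.inr h⟩
        · rcases h with ⟨i, hi, hm, hj⟩
          exact Or.inr ⟨i, by simp [hi], hm, hj⟩
      · rintro (h | ⟨i, hi, hm, hj⟩)
        · exact Or.inl (Or.inl (Or.inl h))
        · rcases List.mem_cons.mp hi with rfl | hi
          · rcases hj with rfl | rfl
            · exact Or.inl (Or.inl (Or.inr rfl))
            · exact Or.inl (Or.inr rfl)
          · exact Or.inr ⟨i, hi, hm, hj⟩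
    · rw [if_neg hx]
      constructor
      · rintro (h | ⟨i, hi, hm, hj⟩)
        · exact Or.inl h
        · exact Or.inr ⟨i, by simp [hi], hm, hj⟩
      · rintro (h | ⟨i, hi, hm, hj⟩)
        · exact Or.inl h
        · rcases List.mem_cons.mp hi with rfl | hi
          · exact absurd hm hx
          · exact Or.inr ⟨i, hi, hm, hj⟩

-- drop-set membership at a Nat index is exactly pvDropP
theorem pvContains_iff (cs : List Char) (k : Nat) :
    (PySem.Set.contains (pvDropSet cs) (k : Int) = true) ↔ pvDropP cs cs.length k := by
  unfold pvDropSet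
  rw [PySem.Set.contains_iff, pvMemFold]
  simp only [PySem.List.mem_pyRange_one]
  constructor
  · rintro (h | ⟨i, ⟨hi0, hi2⟩, hm, hj⟩)
    · simp [PySem.Set.empty] at h
    · obtain ⟨m, rfl⟩ : ∃ m : Nat, i = (m : Int) := ⟨i.toNat, by omega⟩
      have hm2 : m + 2 < cs.length := by omega
      have hp : pvM cs cs.length m := (pvIsMatch_iff cs m hm2).mp hm
      rcases hj with hj | hj
      · have : k = m := by omega
        exact Or.inl (this ▸ hp)
      · have : k = m + 1 := by omega
        subst this
        exact Or.inr ⟨by omega, by simpa using hp⟩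
  · rintro (h | ⟨h1, h⟩)
    · refine Or.inr ⟨(k : Int), ⟨by omega, by have := h.1; omega⟩,
        (pvIsMatch_iff cs k h.1).mpr h, Or.inl rfl⟩
    · refine Or.inr ⟨((k - 1 : Nat) : Int), ⟨by omega, by have := h.1; omega⟩,
        (pvIsMatch_iff cs (k-1) h.1).mpr h, Or.inr (by omega)⟩

-- enumerate + positional filter + projection = range → filter → map
theorem pvEnumFM : ∀ (l : List Char) (s : Nat) (q : Int → Bool),
    ((PySem.List.enumerate l (s : Int)).filter (fun p => q p.1)).map (·.2)
      = ((List.range l.length).filter (fun k => q ((s + k : Nat) : Int))).map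
          (fun k => l.getD k ' ') := by
  intro l
  induction l with
  | nil => simp [PySem.List.enumerate_nil]
  | cons x xs ih =>
    intro s q
    have tail : ((PySem.List.enumerate xs ((s + 1 : Nat) : Int)).filter (fun p => q p.1)).map (·.2)
        = (((List.range xs.length).map Nat.succ).filter (fun k => q ((s + k : Nat) : Int))).map
            (fun k => (x :: xs).getD k ' ') := by
      rw [ih (s+1) q, List.filter_map, List.map_map]
      have hpred : ∀ a ∈ List.range xs.length,
          ((fun k => q ((s + k : Nat) : Int)) ∘ Nat.succ) a = (fun k => q ((s + 1 + k : Nat) : Int)) a := by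
        intro a _
        simp only [Function.comp]
        congr 2
        omega
      rw [List.filter_congr hpred]
      apply List.map_congr_left
      intro a _
      rfl
    rw [PySem.List.enumerate_cons,
      show ((s : Int) + 1) = ((s + 1 : Nat) : Int) by push_cast; ring]
    rw [List.filter_cons]
    have hr : List.range (x :: xs).length = 0 :: (List.range xs.length).map Nat.succ := by
      simp [List.range_succ_eq_map]
    rw [hr, List.filter_cons]
    have hq0 : (q ((s + 0 : Nat) : Int)) = (q (s : Int)) := by norm_num
    by_cases hq : q (s : Int) = true
    · rw [if_pos (by simpa [hq0] using hq), if_pos (by simpa using hq)]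
      simp only [List.map_cons]
      rw [tail]
      rfl
    · rw [if_neg (by simpa [hq0] using hq), if_neg (by simpa using hq)]
      rw [tail]

theorem pvEnumFM0 (l : List Char) (q : Int → Bool) :
    ((PySem.List.enumerate l 0).filter (fun p => q p.1)).map (·.2)
      = ((List.range l.length).filter (fun (k : Nat) => q ((k : Nat) : Int))).map (fun k => l.getD k ' ') := by
  have h := pvEnumFM l 0 q
  rw [show ((0 : Nat) : Int) = (0 : Int) by norm_num] at h
  rw [h]
  congr 1
  apply List.filter_congr
  intro a _
  congr 1
  omega

theorem pvAlt_eq (s : String) :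
    remove_q_equals_artifact_alt s
      = String.mk (((List.range s.toList.length).filter
          (fun j => !pvDropB s.toList s.toList.length j)).map
          (fun j => s.toList.getD j ' ')) := by
  unfold remove_q_equals_artifact_alt
  rw [pvEnumFM0 s.toList (fun i => !(PySem.Set.contains (pvDropSet s.toList) i))]
  congr 1
  congr 1
  apply List.filter_congr
  intro k _
  have hb : PySem.Set.contains (pvDropSet s.toList) (k : Int)
      = pvDropB s.toList s.toList.length k := by
    by_cases hc : pvDropP s.toList s.toList.length k
    · rw [(pvContains_iff s.toList k).mpr hc, (pvDropB_iff s.toList s.toList.length k).mpr hc]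
    · rw [Bool.eq_false_iff.mpr (fun h => hc ((pvContains_iff s.toList k).mp h)),
        Bool.eq_false_iff.mpr (fun h => hc ((pvDropB_iff s.toList s.toList.length k).mp h))]
  rw [hb]

-- ===== VERDICT (by name: the statement is the Claim_ definition above) =====
theorem remove_q_equals_artifact_spec : Claim_equal_remove_q_equals_artifact := by
  intro s _
  unfold Spec_remove_q_equals_artifact remove_q_equals_artifact
  rw [pvAlt_eq, pvLoopA_eq s.toList s.toList.length s.toList.length 0 [] (by omega) (by omega)
        (Or.inl rfl)]
  simp
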